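-- pv_equiv track=rewrite | github.com/OrangeInkDev/ProgrammingCommunity | replace_char.py | FrequentCharacterReplaced
-- ===== SOURCE A (Python) =====
-- def FrequentCharacterReplaced(str1,x):
--     str1=list(str1)
--     d={}
--     for i in range(0,len(str1)):
--         d[str1[i]]=str1.count(str1[i])
--     ch=[i for i in d.keys() if d[i]==max(d.values())]
--     c=min(ch)
--     for i in range(len(str1)):
--         if(str1[i]==c):
--             str1[i]=x
--     return str1
-- ===== SOURCE B (Python) =====
-- def FrequentCharacterReplaced(str1, x):
--     chars = list(str1)
--     runs = []
--     for ch in sorted(chars):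
--         if runs and runs[-1][1] == ch:
--             runs[-1] = (runs[-1][0] + 1, ch)
--         else:
--             runs.append((1, ch))
--     winner = max(runs, key=lambda rc: rc[0])[1]
--     return [x if ch == winner else ch for ch in chars]
-- ===== Notes on version B (the rewrite author's own statement) =====
-- stated objective: faster
-- what changed: Replaces the dict built by repeated str1.count scans (plus a max-of-values filter and min over tied keys) with a sort of the characters followed by a single run-length scan, picking the winner as the first maximal run via max(key=count), which on the ascending sorted runs is exactly the smallest most-frequent character.
import Mathlib
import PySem

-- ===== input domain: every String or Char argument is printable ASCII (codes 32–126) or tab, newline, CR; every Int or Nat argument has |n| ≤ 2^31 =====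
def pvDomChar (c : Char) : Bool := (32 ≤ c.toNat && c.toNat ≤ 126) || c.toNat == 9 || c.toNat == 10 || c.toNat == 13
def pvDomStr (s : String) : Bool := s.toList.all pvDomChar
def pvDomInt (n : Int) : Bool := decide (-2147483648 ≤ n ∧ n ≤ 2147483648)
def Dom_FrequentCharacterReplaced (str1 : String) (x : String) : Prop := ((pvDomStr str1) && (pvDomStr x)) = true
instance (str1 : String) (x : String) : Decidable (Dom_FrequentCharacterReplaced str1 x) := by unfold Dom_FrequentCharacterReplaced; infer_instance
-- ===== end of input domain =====

-- B replaces A's repeated str1.count scans + dict + min-over-tied-keys with a sort of the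
-- characters and one run-length scan whose first maximal run is the winner (objective: faster).

-- ===== PORT A =====
def FrequentCharacterReplaced (str1 : String) (x : String) : List String :=
  let l := str1.toList.map (fun c => String.ofList [c])      -- str1 = list(str1)
  -- for i in range(0, len(str1)): d[str1[i]] = str1.count(str1[i])
  let d := (PySem.List.pyRange 0 (PySem.List.len l)).foldl
    (fun d i => d.insert (PySem.List.pyGetD l i "")
      ((PySem.List.count l (PySem.List.pyGetD l i "") : Int))) PySem.Dict.empty
  -- ch = [i for i in d.keys() if d[i] == max(d.values())]
  let ch := d.keys.filter (fun k =>
    match PySem.List.max? d.values (fun v => v) with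
    | some m => d.getD k 0 == m
    | none => false)
  -- c = min(ch); then the replacement loop over the indices of str1
  match PySem.List.min? ch (fun s => s) with
  | some c => l.map (fun s => if s == c then x else s)
  | none => []                                               -- min([]): ValueError (str1 = ""), outside Pre_

-- ===== PORT B =====
def FrequentCharacterReplaced_alt (str1 : String) (x : String) : List String :=
  let chars := str1.toList.map (fun c => String.ofList [c])
  -- run-length encode sorted(chars)
  let runs := (PySem.List.sorted chars (fun s => s)).foldl
    (fun runs ch =>
      match runs.getLast? with
      | some (n, c) => if c == ch then runs.dropLast ++ [(n + 1, ch)] else runs ++ [((1 : Int), ch)]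
      | none => [((1 : Int), ch)]) []
  -- winner = max(runs, key=lambda rc: rc[0])[1]
  match PySem.List.max? runs (fun rc => rc.1) with
  | some rc => chars.map (fun s => if s == rc.2 then x else s)
  | none => []                                               -- max([]): ValueError (str1 = ""), outside Pre_

-- ===== PRECONDITION & SPEC =====
-- On str1 = "" both A (min of an empty list) and B (max of an empty list) raise ValueError.
def Pre_FrequentCharacterReplaced (str1 : String) (x : String) : Prop := str1 ≠ ""
instance (str1 : String) (x : String) : Decidable (Pre_FrequentCharacterReplaced str1 x) := by
  unfold Pre_FrequentCharacterReplaced; infer_instance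
def pvWitness_FrequentCharacterReplaced : String × String := ("hello", "x")
def Spec_FrequentCharacterReplaced (str1 : String) (x : String) (out : List String) : Prop := out = FrequentCharacterReplaced_alt str1 x
instance (str1 : String) (x : String) (out : List String) : Decidable (Spec_FrequentCharacterReplaced str1 x out) := by unfold Spec_FrequentCharacterReplaced; infer_instance

-- ===== CLAIM (what is proved, stated in full; the proofs are below) =====
def Claim_equal_FrequentCharacterReplaced : Prop := ∀ (str1 : String) (x : String), Dom_FrequentCharacterReplaced str1 x → Pre_FrequentCharacterReplaced str1 x → Spec_FrequentCharacterReplaced str1 x (FrequentCharacterReplaced str1 x)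

-- ===== LEMMAS AND PROOFS =====

-- "c is the smallest among the most frequent elements of l": what both ports select.
def pvBest (l : List String) (c : String) : Prop :=
  c ∈ l ∧ (∀ y ∈ l, l.count y ≤ l.count c) ∧ (∀ y ∈ l, l.count y = l.count c → c ≤ y)

theorem pvBest_unique {l : List String} {c c' : String}
    (h : pvBest l c) (h' : pvBest l c') : c = c' := by
  obtain ⟨hm, hmax, hmin⟩ := h
  obtain ⟨hm', hmax', hmin'⟩ := h'
  have hcc : l.count c = l.count c' := le_antisymm (hmax' c hm) (hmax c' hm')
  exact le_antisymm (hmin c' hm' hcc.symm) (hmin' c hm hcc)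

-- ---- A side ----

theorem pvA_getD_fold (l l' : List String) (d0 : PySem.Dict String Int) (k : String) :
    (l'.foldl (fun d s => d.insert s ((PySem.List.count l s : Int))) d0).getD k 0
      = if k ∈ l' then ((PySem.List.count l k : Int)) else d0.getD k 0 := by
  induction l' generalizing d0 with
  | nil => simp
  | cons a t ih =>
    simp only [List.foldl_cons, ih, List.mem_cons]
    rw [PySem.Dict.getD_insert]
    by_cases hk : k ∈ t
    · simp [hk]
    · by_cases hka : k = a <;> simp [hk, hka]

theorem pvA_best (l : List String) (hl : l ≠ []) :
    ∃ c, PySem.List.min?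
        ((l.foldl (fun d s => d.insert s ((PySem.List.count l s : Int))) PySem.Dict.empty).keys.filter
          (fun k =>
            match PySem.List.max?
                (l.foldl (fun d s => d.insert s ((PySem.List.count l s : Int))) PySem.Dict.empty).values
                (fun v => v) with
            | some m => (l.foldl (fun d s => d.insert s ((PySem.List.count l s : Int))) PySem.Dict.empty).getD k 0 == m
            | none => false)) (fun s => s) = some c ∧ pvBest l c := by
  set d := l.foldl (fun d s => d.insert s ((PySem.List.count l s : Int))) PySem.Dict.empty with hd
  have hkeys : d.keys = PySem.Set.ofList l := by
    rw [hd]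
    rw [PySem.Dict.keys_foldl_insert l (fun _ s => ((PySem.List.count l s : Int))) PySem.Dict.empty]
    rw [PySem.Dict.keys_empty]
    exact PySem.Set.update_nil_left l
  have hnodup : d.keys.Nodup := by
    rw [hd]
    exact PySem.Dict.nodup_keys_foldl_insert l _ _ (by simp [PySem.Dict.keys_empty])
  have hmemk : ∀ k, k ∈ d.keys ↔ k ∈ l := by
    intro k; rw [hkeys]; exact PySem.Set.mem_ofList l k
  have hgetD : ∀ k ∈ l, d.getD k 0 = ((PySem.List.count l k : Int)) := by
    intro k hk; rw [hd, pvA_getD_fold, if_pos hk]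
  have hvals : d.values = d.keys.map (fun k => d.getD k 0) :=
    PySem.Dict.values_eq_map_keys d hnodup 0
  -- the max of the counts
  have hkne : d.keys ≠ [] := by
    have : l.head hl ∈ d.keys := (hmemk _).mpr (List.head_mem hl)
    exact List.ne_nil_of_mem this
  have hvne : d.values ≠ [] := by
    rw [hvals]; simpa using hkne
  obtain ⟨m, hM⟩ : ∃ m, PySem.List.max? d.values (fun v => v) = some m := by
    cases hmx : PySem.List.max? d.values (fun v => v) with
    | none => exact absurd ((PySem.List.max?_eq_none_iff _ _).mp hmx) hvne
    | some m => exact ⟨m, rfl⟩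
  have hmmem := PySem.List.max?_mem hM
  have hmmax := PySem.List.max?_isMax (key := fun v => v) hM
  -- some key attains m
  obtain ⟨k0, hk0keys, hk0⟩ : ∃ k0 ∈ d.keys, d.getD k0 0 = m := by
    rw [hvals] at hmmem
    obtain ⟨k0, hk0, he⟩ := List.mem_map.mp hmmem
    exact ⟨k0, hk0, he⟩
  -- the filtered list
  simp only [hM]
  set ch := d.keys.filter (fun k => d.getD k 0 == m) with hch
  have hk0ch : k0 ∈ ch := List.mem_filter.mpr ⟨hk0keys, by simp [hk0]⟩
  obtain ⟨c, hc⟩ : ∃ c, PySem.List.min? ch (fun s => s) = some c := by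
    cases hmn : PySem.List.min? ch (fun s => s) with
    | none => exact absurd ((PySem.List.min?_eq_none_iff _ _).mp hmn) (List.ne_nil_of_mem hk0ch)
    | some c => exact ⟨c, rfl⟩
  have hcch := PySem.List.min?_mem hc
  have hcmin := PySem.List.min?_isMin (key := fun s => s) hc
  obtain ⟨hckeys, hcm⟩ := List.mem_filter.mp hcch
  have hcl : c ∈ l := (hmemk c).mp hckeys
  have hcount : ((PySem.List.count l c : Int)) = m := by
    rw [← hgetD c hcl]; exact of_decide_eq_true hcm
  refine ⟨c, hc, hcl, ?_, ?_⟩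
  · intro y hy
    have : d.getD y 0 ∈ d.values := by
      rw [hvals]; exact List.mem_map.mpr ⟨y, (hmemk y).mpr hy, rfl⟩
    have hle : d.getD y 0 ≤ m := hmmax _ this
    rw [hgetD y hy] at hle
    rw [← hcount] at hle
    simp only [PySem.List.count_eq] at hle ⊢
    exact_mod_cast hle
  · intro y hy hcnt
    have hych : y ∈ ch := by
      refine List.mem_filter.mpr ⟨(hmemk y).mpr hy, ?_⟩
      rw [hgetD y hy]
      have : ((PySem.List.count l y : Int)) = m := by
        rw [← hcount]
        simp only [PySem.List.count_eq]
        exact_mod_cast hcnt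
      rw [PySem.List.count_eq] at this
      simp [this]
    exact hcmin y hych

-- ---- B side ----

def pvRunsFrom : Int → String → List String → List (Int × String)
  | n, c, [] => [(n, c)]
  | n, c, a :: t => if c == a then pvRunsFrom (n + 1) c t else (n, c) :: pvRunsFrom 1 a t

theorem pvRunsFrom_mem (s : List String) : ∀ n c p, p ∈ pvRunsFrom n c s → p.2 ∈ c :: s := by
  induction s with
  | nil => intro n c p hp; simp [pvRunsFrom] at hp; simp [hp]
  | cons a t ih =>
    intro n c p hp
    by_cases h : c == a <;> simp [pvRunsFrom, h] at hp
    · have := ih _ _ _ hp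
      have hca : c = a := by simpa using h
      simp [List.mem_cons] at this ⊢
      tauto
    · rcases hp with hp | hp
      · simp [hp]
      · have := ih _ _ _ hp
        simp [List.mem_cons] at this ⊢
        tauto

theorem pvRunsFrom_cover (s : List String) : ∀ n c y, y ∈ c :: s → ∃ p ∈ pvRunsFrom n c s, p.2 = y := by
  induction s with
  | nil => intro n c y hy; simp at hy; exact ⟨(n, c), by simp [pvRunsFrom, hy]⟩
  | cons a t ih =>
    intro n c y hy
    by_cases h : c == a
    · have hca : c = a := by simpa using h
      have : y ∈ c :: t := by simp [List.mem_cons] at hy ⊢; subst hca; tauto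
      obtain ⟨p, hp, he⟩ := ih (n+1) c y this
      exact ⟨p, by simp [pvRunsFrom, h, hp], he⟩
    · rcases List.mem_cons.mp hy with hy | hy
      · exact ⟨(n, c), by simp [pvRunsFrom, h], by simp [hy]⟩
      · obtain ⟨p, hp, he⟩ := ih 1 a y hy
        exact ⟨p, by simp [pvRunsFrom, h]; right; exact hp, he⟩

theorem pvRunsFrom_chars_lt (s : List String) : ∀ n c, (c :: s).Pairwise (· ≤ ·) →
    ((pvRunsFrom n c s).map (·.2)).Pairwise (· < ·) := by
  induction s with
  | nil => intro n c _; simp [pvRunsFrom]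
  | cons a t ih =>
    intro n c hp
    have hp' : (a :: t).Pairwise (· ≤ ·) := hp.tail
    by_cases h : c == a
    · have hca : c = a := by simpa using h
      have : (c :: t).Pairwise (· ≤ ·) := by
        subst hca
        exact (List.pairwise_cons.mpr ⟨fun y hy => (List.pairwise_cons.mp hp).1 y (by simp [hy]), hp'.tail⟩)
      simpa [pvRunsFrom, h] using ih (n+1) c this
    · have hca : c ≠ a := by simpa using h
      have hcle : ∀ y ∈ a :: t, c ≤ y := (List.pairwise_cons.mp hp).1
      have hclt : ∀ y ∈ a :: t, c < y := by
        intro y hy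
        rcases lt_or_eq_of_le (hcle y hy) with h1 | h1
        · exact h1
        · -- c = y; y ≥ a > c? show contradiction: a ≤ y = c and c ≤ a, c ≠ a
          have hay : a ≤ y := by
            rcases List.mem_cons.mp hy with rfl | hy'
            · exact le_refl _
            · exact (List.pairwise_cons.mp hp').1 y hy'
          subst h1
          exact absurd (le_antisymm (hcle a (by simp)) hay) hca
      rw [show pvRunsFrom n c (a :: t) = (n, c) :: pvRunsFrom 1 a t by simp [pvRunsFrom, h]]
      simp only [List.map_cons, List.pairwise_cons]
      constructor
      · intro y hy
        simp only [List.mem_map] at hy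
        obtain ⟨p, hp2, rfl⟩ := hy
        exact hclt _ (pvRunsFrom_mem t 1 a p hp2)
      · exact ih 1 a hp'

theorem pvRunsFrom_count (s : List String) : ∀ n c, (c :: s).Pairwise (· ≤ ·) →
    ∀ p ∈ pvRunsFrom n c s, p.1 = if p.2 = c then n + (s.count c : Int) else (s.count p.2 : Int) := by
  induction s with
  | nil => intro n c _ p hp; simp [pvRunsFrom] at hp; simp [hp]
  | cons a t ih =>
    intro n c hp p hmem
    have hp' : (a :: t).Pairwise (· ≤ ·) := hp.tail
    by_cases h : c == a
    · have hca : c = a := by simpa using h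
      subst hca
      have hct : (c :: t).Pairwise (· ≤ ·) := List.pairwise_cons.mpr
        ⟨fun y hy => (List.pairwise_cons.mp hp).1 y (by simp [hy]), hp'.tail⟩
      have := ih (n+1) c hct p (by simpa [pvRunsFrom] using hmem)
      by_cases hpc : p.2 = c
      · rw [if_pos hpc] at this ⊢
        rw [this]; simp [hpc]; ring
      · rw [if_neg hpc] at this ⊢
        rw [this]
        congr 1
        simp [List.count_cons]
        intro hh; exact absurd hh.symm hpc
    · have hca : c ≠ a := by simpa using h
      have hcle : ∀ y ∈ a :: t, c ≤ y := (List.pairwise_cons.mp hp).1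
      have hcnot : c ∉ a :: t := by
        intro hcmem
        have hay : a ≤ c := by
          rcases List.mem_cons.mp hcmem with h1 | h1
          · exact le_of_eq h1.symm
          · exact (List.pairwise_cons.mp hp').1 c h1
        exact hca (le_antisymm (hcle a (by simp)) hay)
      rw [show pvRunsFrom n c (a :: t) = (n, c) :: pvRunsFrom 1 a t by simp [pvRunsFrom, h]] at hmem
      rcases List.mem_cons.mp hmem with rfl | hmem'
      · simp [List.count_eq_zero_of_not_mem hcnot]
      · have := ih 1 a hp' p hmem'
        have hpmem : p.2 ∈ a :: t := pvRunsFrom_mem t 1 a p hmem'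
        have hpc : p.2 ≠ c := fun he => hcnot (he ▸ hpmem)
        rw [if_neg hpc]
        by_cases hpa : p.2 = a
        · rw [if_pos hpa] at this
          rw [this]; simp [hpa]; ring
        · rw [if_neg hpa] at this
          rw [this]
          simp [List.count_cons]
          intro hh; exact absurd hh.symm hpa


theorem pvMax?_aux {α κ : Type} [LT κ] [DecidableLT κ] (key : α → κ) (t : List α) : ∀ (x : α),
    t.foldl (fun acc y => match acc with
      | none => some y
      | some m => if key m < key y then some y else some m) (some x)
      = some (t.foldl (fun m y => if key m < key y then y else m) x) := by
  induction t with
  | nil => intro x; rfl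
  | cons a t ih =>
    intro x
    simp only [List.foldl_cons]
    by_cases h : key x < key a <;> simp [h, ih]

theorem pvMax?_cons {α κ : Type} [LT κ] [DecidableLT κ] (key : α → κ) (t : List α) (x : α) :
    PySem.List.max? (x :: t) key = some (t.foldl (fun m y => if key m < key y then y else m) x) := by
  unfold PySem.List.max?
  rw [List.foldl_cons]
  exact pvMax?_aux key t x

theorem pvFoldMax_strict (t : List (Int × String)) : ∀ (x : Int × String),
    t.foldl (fun m y => if m.1 < y.1 then y else m) x = x ∨
      (t.foldl (fun m y => if m.1 < y.1 then y else m) x ∈ t ∧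
        x.1 < (t.foldl (fun m y => if m.1 < y.1 then y else m) x).1) := by
  induction t with
  | nil => intro x; left; rfl
  | cons a t ih =>
    intro x
    simp only [List.foldl_cons]
    by_cases h : x.1 < a.1
    · rw [if_pos h]
      rcases ih a with h1 | ⟨h1, h2⟩
      · right; rw [h1]; exact ⟨by simp, h⟩
      · right; exact ⟨by simp [h1], lt_trans h h2⟩
    · rw [if_neg h]
      rcases ih x with h1 | ⟨h1, h2⟩
      · left; exact h1
      · right; exact ⟨by simp [h1], h2⟩

theorem pvFoldMax_first (t : List (Int × String)) : ∀ (x : Int × String),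
    ((x :: t).map (·.2)).Pairwise (· < ·) →
    ∀ q ∈ x :: t, q.1 = (t.foldl (fun m y => if m.1 < y.1 then y else m) x).1 →
      (t.foldl (fun m y => if m.1 < y.1 then y else m) x).2 ≤ q.2 := by
  induction t with
  | nil =>
    intro x _ q hq _
    simp at hq; simp [hq]
  | cons a t ih =>
    intro x hpw q hq hkey
    simp only [List.foldl_cons] at hkey ⊢
    simp only [List.map_cons] at hpw
    obtain ⟨hx, hpw1⟩ := List.pairwise_cons.mp hpw
    obtain ⟨ha, hpw2⟩ := List.pairwise_cons.mp hpw1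
    by_cases h : x.1 < a.1
    · rw [if_pos h] at hkey ⊢
      have hpwa : ((a :: t).map (·.2)).Pairwise (· < ·) := by
        simp only [List.map_cons]; exact hpw1
      rcases List.mem_cons.mp hq with heq | hq'
      · -- q = x : impossible, the fold from a has key ≥ a.1 > x.1
        exfalso
        rcases pvFoldMax_strict t a with h1 | ⟨_, h2⟩
        · rw [h1] at hkey; rw [heq] at hkey; omega
        · rw [heq] at hkey; omega
      · exact ih a hpwa q hq' hkey
    · rw [if_neg h] at hkey ⊢
      have hpwx : ((x :: t).map (·.2)).Pairwise (· < ·) := by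
        simp only [List.map_cons]
        exact List.pairwise_cons.mpr ⟨fun y hy => hx y (by simp [hy]), hpw2⟩
      rcases List.mem_cons.mp hq with heq | hq'
      · rw [heq]; exact ih x hpwx x (by simp) (by rw [heq] at hkey; exact hkey)
      · rcases List.mem_cons.mp hq' with heq | hq''
        · -- q = a, and not x.1 < a.1
          rcases pvFoldMax_strict t x with h1 | ⟨h1, h2⟩
          · rw [h1]
            rw [heq]
            exact le_of_lt (hx a.2 (by simp))
          · exfalso; rw [← hkey, heq] at h2; omega
        · exact ih x hpwx q (by simp [hq'']) hkey
def pvStepB : List (Int × String) → String → List (Int × String) :=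
  fun runs ch =>
    match runs.getLast? with
    | some (n, c) => if c == ch then runs.dropLast ++ [(n + 1, ch)] else runs ++ [((1 : Int), ch)]
    | none => [((1 : Int), ch)]

theorem pvFoldl_runs (s : List String) : ∀ (acc : List (Int × String)) (n : Int) (c : String),
    s.foldl pvStepB (acc ++ [(n, c)]) = acc ++ pvRunsFrom n c s := by
  induction s with
  | nil => intro acc n c; simp [pvRunsFrom]
  | cons a t ih =>
    intro acc n c
    simp only [List.foldl_cons, pvRunsFrom]
    by_cases h : c == a
    · rw [show pvStepB (acc ++ [(n, c)]) a = acc ++ [(n + 1, a)] by simp [pvStepB, h]]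
      rw [ih acc (n + 1) a]
      simp_all
    · rw [show pvStepB (acc ++ [(n, c)]) a = (acc ++ [(n, c)]) ++ [(1, a)] by simp [pvStepB, h]]
      rw [ih (acc ++ [(n, c)]) 1 a]
      simp [h]

theorem pvRunsFrom_ne_nil (s : List String) : ∀ n c, pvRunsFrom n c s ≠ [] := by
  induction s with
  | nil => intro n c; simp [pvRunsFrom]
  | cons a t ih => intro n c; by_cases h : c == a <;> simp [pvRunsFrom, h, ih]

theorem pvB_best (l : List String) (hl : l ≠ []) :
    ∃ rc, PySem.List.max?
        ((PySem.List.sorted l (fun s => s)).foldl pvStepB []) (fun rc => rc.1) = some rc ∧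
      pvBest l rc.2 := by
  have hperm : (PySem.List.sorted l (fun s => s)).Perm l := PySem.List.sorted_perm l (fun s => s) false
  have hs0ne : PySem.List.sorted l (fun s => s) ≠ [] := by
    intro h; exact hl ((PySem.List.sorted_eq_nil_iff l (fun s => s) false).mp h)
  obtain ⟨a, t, heq⟩ := List.exists_cons_of_ne_nil hs0ne
  have hpw' : (a :: t).Pairwise (· ≤ ·) := by
    have := PySem.List.sorted_pairwise l (fun s => s)
    rwa [heq] at this
  have hruns : (PySem.List.sorted l (fun s => s)).foldl pvStepB [] = pvRunsFrom 1 a t := by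
    rw [heq, List.foldl_cons]
    rw [show pvStepB [] a = ([] : List (Int × String)) ++ [((1 : Int), a)] from rfl]
    rw [pvFoldl_runs t [] 1 a]
    simp
  have hmemat : ∀ y, y ∈ a :: t ↔ y ∈ l := by
    intro y; rw [← heq]; exact hperm.mem_iff
  have hcnt : ∀ y, (a :: t).count y = l.count y := by
    intro y
    have := hperm.count_eq y
    rwa [heq] at this
  -- counts of the runs
  have hcount : ∀ p ∈ pvRunsFrom 1 a t, p.1 = (((a :: t).count p.2 : Nat) : Int) := by
    intro p hp
    have := pvRunsFrom_count t 1 a hpw' p hp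
    by_cases hpa : p.2 = a
    · rw [if_pos hpa] at this
      rw [this, hpa]
      simp
      ring
    · rw [if_neg hpa] at this
      rw [this]
      congr 1
      simp [List.count_cons]
      intro hh; exact absurd hh.symm hpa
  have hlt : ((pvRunsFrom 1 a t).map (·.2)).Pairwise (· < ·) := pvRunsFrom_chars_lt t 1 a hpw'
  obtain ⟨r, rt, hreq⟩ := List.exists_cons_of_ne_nil (pvRunsFrom_ne_nil t 1 a)
  rw [hruns, hreq, pvMax?_cons]
  set p := rt.foldl (fun m y => if m.1 < y.1 then y else m) r with hpdef
  refine ⟨p, rfl, ?_, ?_, ?_⟩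
  · -- p.2 ∈ l
    have hpmem : p ∈ r :: rt := by
      rcases pvFoldMax_strict rt r with h1 | ⟨h1, _⟩
      · rw [hpdef, h1]; simp
      · rw [hpdef]; simp [h1]
    have := pvRunsFrom_mem t 1 a p (hreq ▸ hpmem)
    exact (hmemat p.2).mp this
  · -- maximal count
    intro y hy
    obtain ⟨q, hq, hq2⟩ := pvRunsFrom_cover t 1 a y ((hmemat y).mpr hy)
    have hqle : q.1 ≤ p.1 :=
      PySem.List.max?_isMax (key := fun rc => rc.1) (pvMax?_cons _ rt r) q (hreq ▸ hq)
    have hppos : p ∈ pvRunsFrom 1 a t := by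
      rw [hreq]
      rcases pvFoldMax_strict rt r with h1 | ⟨h1, _⟩
      · rw [hpdef, h1]; simp
      · rw [hpdef]; simp [h1]
    rw [hcount q hq, hcount p hppos, hq2] at hqle
    rw [hcnt y, hcnt p.2] at hqle
    exact_mod_cast hqle
  · -- first maximal run: minimality on ties
    intro y hy hcc
    obtain ⟨q, hq, hq2⟩ := pvRunsFrom_cover t 1 a y ((hmemat y).mpr hy)
    have hppos : p ∈ pvRunsFrom 1 a t := by
      rw [hreq]
      rcases pvFoldMax_strict rt r with h1 | ⟨h1, _⟩
      · rw [hpdef, h1]; simp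
      · rw [hpdef]; simp [h1]
    have hqkey : q.1 = p.1 := by
      rw [hcount q hq, hcount p hppos, hq2, hcnt y, hcnt p.2]
      exact_mod_cast hcc
    have := pvFoldMax_first rt r (hreq ▸ hlt) q (hreq ▸ hq) hqkey
    rw [hq2] at this
    exact this

-- ===== VERDICT (by name: the statement is the Claim_ definition above) =====
theorem FrequentCharacterReplaced_spec : Claim_equal_FrequentCharacterReplaced := by
  intro str1 x _ hpre
  unfold Spec_FrequentCharacterReplaced
  unfold Pre_FrequentCharacterReplaced at hpre
  have hlne : str1.toList.map (fun c => String.ofList [c]) ≠ [] := by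
    intro h
    rw [List.map_eq_nil_iff] at h
    exact hpre (String.toList_inj.mp (by simp [h]))
  set l := str1.toList.map (fun c => String.ofList [c]) with hldef
  obtain ⟨c, hc, hbc⟩ := pvA_best l hlne
  obtain ⟨rc, hrc, hbrc⟩ := pvB_best l hlne
  have heqc : c = rc.2 := pvBest_unique hbc hbrc
  have hfold : (PySem.List.pyRange 0 (PySem.List.len l)).foldl
      (fun d i => d.insert (PySem.List.pyGetD l i "")
        ((PySem.List.count l (PySem.List.pyGetD l i "") : Int))) PySem.Dict.empty
      = l.foldl (fun d s => d.insert s ((PySem.List.count l s : Int))) PySem.Dict.empty := by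
    rw [PySem.List.foldl_pyRange_pyGetD l "" (fun d s => d.insert s ((PySem.List.count l s : Int)))
      PySem.Dict.empty (by norm_num)]
    simp
  have hA : FrequentCharacterReplaced str1 x =
      (match PySem.List.min?
          (((PySem.List.pyRange 0 (PySem.List.len l)).foldl
            (fun d i => d.insert (PySem.List.pyGetD l i "")
              ((PySem.List.count l (PySem.List.pyGetD l i "") : Int))) PySem.Dict.empty).keys.filter
            (fun k =>
              match PySem.List.max?
                  ((PySem.List.pyRange 0 (PySem.List.len l)).foldl
                    (fun d i => d.insert (PySem.List.pyGetD l i "")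
                      ((PySem.List.count l (PySem.List.pyGetD l i "") : Int))) PySem.Dict.empty).values
                  (fun v => v) with
              | some m => ((PySem.List.pyRange 0 (PySem.List.len l)).foldl
                    (fun d i => d.insert (PySem.List.pyGetD l i "")
                      ((PySem.List.count l (PySem.List.pyGetD l i "") : Int))) PySem.Dict.empty).getD k 0 == m
              | none => false)) (fun s => s) with
        | some c => l.map (fun s => if s == c then x else s)
        | none => []) := rfl
  rw [hfold, hc] at hA
  have hB : FrequentCharacterReplaced_alt str1 x =
      (match PySem.List.max? ((PySem.List.sorted l (fun s => s)).foldl pvStepB []) (fun rc => rc.1) with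
        | some rc => l.map (fun s => if s == rc.2 then x else s)
        | none => []) := rfl
  rw [hrc] at hB
  rw [hA, hB, heqc]
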